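-- pv_equiv track=rewrite | github.com/eugeniofdz/Sudoku-Solver | rendering.py | num_counter
-- ===== SOURCE A (Python) =====
-- def num_counter(mat):
--     nums = {
--         1: 0,
--         2: 0,
--         3: 0,
--         4: 0,
--         5: 0,
--         6: 0,
--         7: 0,
--         8: 0,
--         9: 0
--     }
--     for row in range(9):
--         for num in mat[row]:
--             if num in nums:
--                 nums[num] += 1
--     return nums
-- ===== SOURCE B (Python) =====
-- def num_counter(mat):
--     return {n: sum(mat[r].count(n) for r in range(9)) for n in range(1, 10)}
-- ===== Notes on version B (the rewrite author's own statement) =====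
-- stated objective: simpler
-- what changed: Replaces the single incrementing pass with a mutable dict by a dict comprehension that makes one counting scan per digit 1-9 (sum of row.count(n) over the 9 rows).
import Mathlib
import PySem

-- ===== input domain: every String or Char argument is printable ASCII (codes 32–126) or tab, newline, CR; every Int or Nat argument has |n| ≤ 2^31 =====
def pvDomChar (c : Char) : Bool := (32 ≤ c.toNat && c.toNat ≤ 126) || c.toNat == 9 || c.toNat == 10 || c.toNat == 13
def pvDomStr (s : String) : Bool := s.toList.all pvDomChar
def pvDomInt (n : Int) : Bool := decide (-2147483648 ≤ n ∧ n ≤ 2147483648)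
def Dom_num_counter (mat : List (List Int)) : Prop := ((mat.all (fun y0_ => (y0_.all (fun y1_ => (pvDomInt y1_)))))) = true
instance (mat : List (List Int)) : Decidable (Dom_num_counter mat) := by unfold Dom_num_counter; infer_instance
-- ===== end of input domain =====

-- B replaces A's single incrementing pass over a mutable dict by a per-digit counting
-- comprehension (one scan per digit 1-9); same return value, A is not mutated.

-- ===== PORT A =====
-- literal port of A: dict of zero counts for 1..9, then for row in range(9): for num in
-- mat[row]: if num in nums: nums[num] += 1.  mat[row] is pyGet?; under Pre_ (9 ≤ length)
-- it is always `some`, the `.getD []` default is never reached.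
def num_counter (mat : List (List Int)) : List (Int × Int) :=
  let nums : PySem.Dict Int Int :=
    PySem.Dict.ofList [(1,0),(2,0),(3,0),(4,0),(5,0),(6,0),(7,0),(8,0),(9,0)]
  ((PySem.List.pyRange 0 9 1).foldl (fun d row =>
      ((PySem.List.pyGet? mat row).getD []).foldl
        (fun d num => if d.contains num then d.modify num 0 (· + 1) else d) d)
    nums).items

-- ===== PORT B =====
-- literal port of Source B: {n: sum(mat[r].count(n) for r in range(9)) for n in range(1, 10)}
def num_counter_alt (mat : List (List Int)) : List (Int × Int) :=
  (PySem.List.pyRange 1 10 1).map (fun n =>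
    (n, ((PySem.List.pyRange 0 9 1).map
          (fun r => PySem.List.count ((PySem.List.pyGet? mat r).getD []) n)).sum))

-- ===== PRECONDITION & SPEC =====
-- A indexes mat[0]..mat[8]; with fewer than 9 rows both Pythons raise IndexError.
def Pre_num_counter (mat : List (List Int)) : Prop := 9 ≤ mat.length
instance (mat : List (List Int)) : Decidable (Pre_num_counter mat) := by
  unfold Pre_num_counter; infer_instance
def pvWitness_num_counter : List (List Int) :=
  [[1,2],[3],[],[5,5,0],[9],[7],[4],[12,-1],[8]]

def Spec_num_counter (mat : List (List Int)) (out : List (Int × Int)) : Prop := out = num_counter_alt mat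
instance (mat : List (List Int)) (out : List (Int × Int)) : Decidable (Spec_num_counter mat out) := by unfold Spec_num_counter; infer_instance

-- ===== CLAIM (what is proved, stated in full; the proofs are below) =====
def Claim_equal_num_counter : Prop := ∀ (mat : List (List Int)), Dom_num_counter mat → Pre_num_counter mat → Spec_num_counter mat (num_counter mat)

-- ===== LEMMAS AND PROOFS =====

-- A's dict always has exactly the keys 1..9 in order; represent its state by the value map.
def dictOfFn (a : Int → Int) : PySem.Dict Int Int :=
  ⟨[(1,a 1),(2,a 2),(3,a 3),(4,a 4),(5,a 5),(6,a 6),(7,a 7),(8,a 8),(9,a 9)]⟩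

lemma dictOfFn_congr {a b : Int → Int}
    (h : ∀ n, 1 ≤ n → n ≤ 9 → a n = b n) : dictOfFn a = dictOfFn b := by
  unfold dictOfFn
  rw [h 1 (by norm_num) (by norm_num), h 2 (by norm_num) (by norm_num),
      h 3 (by norm_num) (by norm_num), h 4 (by norm_num) (by norm_num),
      h 5 (by norm_num) (by norm_num), h 6 (by norm_num) (by norm_num),
      h 7 (by norm_num) (by norm_num), h 8 (by norm_num) (by norm_num),
      h 9 (by norm_num) (by norm_num)]

-- one body step of A's inner loop, on the invariant state
lemma step_dictOfFn (a : Int → Int) (x : Int) :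
    (if (dictOfFn a).contains x then (dictOfFn a).modify x 0 (· + 1) else dictOfFn a)
      = dictOfFn (fun n => a n + if n = x then 1 else 0) := by
  by_cases h1 : x = 1
  · subst h1; simp [dictOfFn, PySem.Dict.contains, PySem.Dict.get?, PySem.Dict.modify,
      PySem.Dict.insert, PySem.Dict.getD]
  by_cases h2 : x = 2
  · subst h2; simp [dictOfFn, PySem.Dict.contains, PySem.Dict.get?, PySem.Dict.modify,
      PySem.Dict.insert, PySem.Dict.getD]
  by_cases h3 : x = 3
  · subst h3; simp [dictOfFn, PySem.Dict.contains, PySem.Dict.get?, PySem.Dict.modify,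
      PySem.Dict.insert, PySem.Dict.getD]
  by_cases h4 : x = 4
  · subst h4; simp [dictOfFn, PySem.Dict.contains, PySem.Dict.get?, PySem.Dict.modify,
      PySem.Dict.insert, PySem.Dict.getD]
  by_cases h5 : x = 5
  · subst h5; simp [dictOfFn, PySem.Dict.contains, PySem.Dict.get?, PySem.Dict.modify,
      PySem.Dict.insert, PySem.Dict.getD]
  by_cases h6 : x = 6
  · subst h6; simp [dictOfFn, PySem.Dict.contains, PySem.Dict.get?, PySem.Dict.modify,
      PySem.Dict.insert, PySem.Dict.getD]
  by_cases h7 : x = 7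
  · subst h7; simp [dictOfFn, PySem.Dict.contains, PySem.Dict.get?, PySem.Dict.modify,
      PySem.Dict.insert, PySem.Dict.getD]
  by_cases h8 : x = 8
  · subst h8; simp [dictOfFn, PySem.Dict.contains, PySem.Dict.get?, PySem.Dict.modify,
      PySem.Dict.insert, PySem.Dict.getD]
  by_cases h9 : x = 9
  · subst h9; simp [dictOfFn, PySem.Dict.contains, PySem.Dict.get?, PySem.Dict.modify,
      PySem.Dict.insert, PySem.Dict.getD]
  have hc : (dictOfFn a).contains x = false := by
    simp [dictOfFn, PySem.Dict.contains]
    omega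
  rw [hc]
  simp only [Bool.false_eq_true, if_false]
  exact dictOfFn_congr (fun n h1n h9n => by
    have : ¬ n = x := by omega
    simp [this])

-- A's inner loop over one row adds that row's counts to the state
lemma inner_fold (l : List Int) (a : Int → Int) :
    l.foldl (fun d num => if d.contains num then d.modify num 0 (· + 1) else d) (dictOfFn a)
      = dictOfFn (fun n => a n + (l.count n : Int)) := by
  induction l generalizing a with
  | nil => simp
  | cons x xs ih =>
      simp only [List.foldl_cons]
      rw [step_dictOfFn, ih]
      exact dictOfFn_congr (fun n _ _ => by
        by_cases h : n = x <;> simp [h, List.count_cons] <;> omega)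

-- ===== VERDICT (by name: the statement is the Claim_ definition above) =====
theorem num_counter_spec : Claim_equal_num_counter := by
  intro mat _ _
  unfold Spec_num_counter num_counter num_counter_alt
  have hr : PySem.List.pyRange 0 9 1 = [0,1,2,3,4,5,6,7,8] := by decide
  have hn : PySem.List.pyRange 1 10 1 = [1,2,3,4,5,6,7,8,9] := by decide
  rw [hr, hn]
  have h0 : PySem.Dict.ofList [((1:Int),(0:Int)),(2,0),(3,0),(4,0),(5,0),(6,0),(7,0),(8,0),(9,0)]
      = dictOfFn (fun _ => 0) := by decide
  simp only [List.foldl_cons, List.foldl_nil, List.map_cons, List.map_nil, h0]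
  rw [inner_fold, inner_fold, inner_fold, inner_fold, inner_fold, inner_fold, inner_fold,
      inner_fold, inner_fold]
  simp [dictOfFn, PySem.List.count_eq, List.sum_cons, List.sum_nil]
  omega
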